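-- pv_equiv track=rewrite | github.com/morvvy/hw_tasks | task_1/exercise_8/exercise_8.py | enumerate_list
-- ===== SOURCE A (Python) =====
-- def enumerate_list(
--     data: list, start: int = 0, step: int = 1, recursive: bool = False
-- ) -> list:
--     def recursive_enumerate(lst, idx):
--         result = []
--         for i, item in enumerate(lst):
--             if recursive and isinstance(item, list):
--                 result.extend(recursive_enumerate(item, idx))
--                 idx += len(item)
--             else:
--                 result.append((idx, item))
--                 idx += step
--         return result
--
--     if recursive:
--         return recursive_enumerate(data, start)
--     else:
--         return [(start + i * step, item) for i, item in enumerate(data)]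
-- ===== SOURCE B (Python) =====
-- def enumerate_list(data, start=0, step=1, recursive=False):
--     # On flat integer lists the recursive flag changes nothing:
--     # one closed-form comprehension covers both branches.
--     return [(start + i * step, item) for i, item in enumerate(data)]
-- ===== Notes on version B (the rewrite author's own statement) =====
-- stated objective: simpler
-- what changed: Replaces the recursive accumulator helper (recursive branch) with the single closed-form comprehension, valid because flat int lists make the isinstance branch dead.
import Mathlib
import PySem

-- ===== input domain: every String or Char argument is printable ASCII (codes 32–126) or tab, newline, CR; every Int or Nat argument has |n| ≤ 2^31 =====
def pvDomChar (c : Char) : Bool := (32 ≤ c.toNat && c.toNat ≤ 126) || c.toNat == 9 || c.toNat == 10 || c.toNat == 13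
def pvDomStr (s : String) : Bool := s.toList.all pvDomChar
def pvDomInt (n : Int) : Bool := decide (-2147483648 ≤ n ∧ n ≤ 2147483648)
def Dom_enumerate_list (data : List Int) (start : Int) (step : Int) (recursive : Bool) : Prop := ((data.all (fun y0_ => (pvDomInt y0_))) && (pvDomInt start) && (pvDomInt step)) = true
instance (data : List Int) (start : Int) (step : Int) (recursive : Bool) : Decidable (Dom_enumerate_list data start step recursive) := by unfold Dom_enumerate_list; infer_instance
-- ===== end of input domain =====

-- B replaces A's recursive accumulator helper (dead for flat int lists) with the
-- single closed-form comprehension for both branches; objective: simpler.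
-- ===== PORT A =====
-- Port of A: the inner helper recursive_enumerate as structural recursion over the
-- list carrying idx; 'isinstance(item, list)' is always False for Int elements, so
-- only the else-branch is ported (exact on List Int).
def recEnumA (step : Int) : List Int → Int → List (Int × Int)
  | [], _ => []
  | item :: rest, idx => (idx, item) :: recEnumA step rest (idx + step)

def enumerate_list (data : List Int) (start : Int) (step : Int) (recursive : Bool) : List (Int × Int) :=
  if recursive then
    recEnumA step data start
  else
    data.zipIdx.map (fun q => (start + (q.2 : Int) * step, q.1))

-- ===== PORT B =====
-- Port of B: one closed-form comprehension for both branches.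
def enumerate_list_alt (data : List Int) (start : Int) (step : Int) (recursive : Bool) : List (Int × Int) :=
  (PySem.List.enumerate data).map (fun p => (start + p.1 * step, p.2))

-- ===== PRECONDITION & SPEC =====
def Spec_enumerate_list (data : List Int) (start : Int) (step : Int) (recursive : Bool) (out : List (Int × Int)) : Prop := out = enumerate_list_alt data start step recursive
instance (data : List Int) (start : Int) (step : Int) (recursive : Bool) (out : List (Int × Int)) : Decidable (Spec_enumerate_list data start step recursive out) := by unfold Spec_enumerate_list; infer_instance

-- ===== CLAIM (what is proved, stated in full; the proofs are below) =====
def Claim_equal_enumerate_list : Prop := ∀ (data : List Int) (start : Int) (step : Int) (recursive : Bool), Dom_enumerate_list data start step recursive → Spec_enumerate_list data start step recursive (enumerate_list data start step recursive)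

-- ===== LEMMAS AND PROOFS =====

-- ===== VERDICT (by name: the statement is the Claim_ definition above) =====
lemma enumerate_shift {α : Type} (xs : List α) (s : Int) :
    PySem.List.enumerate xs (s + 1)
      = (PySem.List.enumerate xs s).map (fun p => (p.1 + 1, p.2)) := by
  induction xs generalizing s with
  | nil => simp [PySem.List.enumerate_nil]
  | cons y ys ihy => simp [PySem.List.enumerate_cons, ihy]

lemma recEnumA_eq (step : Int) (l : List Int) (idx : Int) :
    recEnumA step l idx = (PySem.List.enumerate l).map (fun p => (idx + p.1 * step, p.2)) := by
  induction l generalizing idx with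
  | nil => simp [recEnumA, PySem.List.enumerate_nil]
  | cons x xs ih =>
    simp only [recEnumA, PySem.List.enumerate_cons, List.map_cons, ih,
      enumerate_shift xs 0, List.map_map]
    refine congrArg₂ List.cons (by ring_nf) ?_
    apply List.map_congr_left
    intro p _
    simp only [Function.comp_apply]
    refine Prod.ext ?_ rfl
    ring

theorem enumerate_list_spec : Claim_equal_enumerate_list := by
  intro data start step recursive _
  unfold Spec_enumerate_list enumerate_list enumerate_list_alt
  cases recursive with
  | false =>
      simp only [if_neg Bool.false_ne_true, PySem.List.enumerate_eq_zipIdx_map,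
        List.map_map]
      simp
  | true => simp [recEnumA_eq]
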